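-- pv_equiv track=rewrite | github.com/eubr-bigsea/Compss-Python | functions/etl/Aggregation.py | create_execution_list
-- ===== SOURCE A (Python) =====
-- def create_execution_list(numFrag):
--     """Create a list of execution."""
--     # buffer to store the join between each block
--     import itertools
--     buff = list(itertools.combinations([x for x in range(numFrag)], 2))
--
--     # Merging the partial results
--     def disjoint(a, b):
--         return set(a).isdisjoint(b)
--
--     x_i = []
--     y_i = []
--
--     while len(buff) > 0:
--         x = buff[0][0]
--         step_list_i = []
--         step_list_j = []
--         if x >= 0:
--             y = buff[0][1]
--             step_list_i.append(x)
--             step_list_j.append(y)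
--             buff[0] = [-1, -1]
--             for j in range(len(buff)):
--                 tuples = buff[j]
--                 if tuples[0] >= 0:
--                     if disjoint(tuples, step_list_i):
--                         if disjoint(tuples, step_list_j):
--                             step_list_i.append(tuples[0])
--                             step_list_j.append(tuples[1])
--                             buff[j] = [-1, -1]
--         del buff[0]
--         x_i.extend(step_list_i)
--         y_i.extend(step_list_j)
--     return x_i, y_i
-- ===== SOURCE B (Python) =====
-- def create_execution_list(numFrag):
--     """Create a list of execution."""
--     import itertools
--     # First-fit round assignment: each pair goes into the earliest round
--     # in which both its endpoints are still unused; rounds are concatenated.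
--     buckets = []  # each round: (xs, ys)
--     for i, j in itertools.combinations(range(numFrag), 2):
--         for xs, ys in buckets:
--             if i not in xs and i not in ys and j not in xs and j not in ys:
--                 xs.append(i)
--                 ys.append(j)
--                 break
--         else:
--             buckets.append(([i], [j]))
--     x_i = []
--     y_i = []
--     for xs, ys in buckets:
--         x_i += xs
--         y_i += ys
--     return x_i, y_i
-- ===== Notes on version B (the rewrite author's own statement) =====
-- stated objective: alternative
-- what changed: A repeatedly rescans the whole pair buffer once per round, leaving [-1,-1] tombstones in place and rebuilding Python sets for every disjointness test; B makes a single pass over the pairs, dropping each pair into the earliest round whose endpoint lists are free (first-fit on buckets), then concatenates the rounds.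
import Mathlib
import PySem

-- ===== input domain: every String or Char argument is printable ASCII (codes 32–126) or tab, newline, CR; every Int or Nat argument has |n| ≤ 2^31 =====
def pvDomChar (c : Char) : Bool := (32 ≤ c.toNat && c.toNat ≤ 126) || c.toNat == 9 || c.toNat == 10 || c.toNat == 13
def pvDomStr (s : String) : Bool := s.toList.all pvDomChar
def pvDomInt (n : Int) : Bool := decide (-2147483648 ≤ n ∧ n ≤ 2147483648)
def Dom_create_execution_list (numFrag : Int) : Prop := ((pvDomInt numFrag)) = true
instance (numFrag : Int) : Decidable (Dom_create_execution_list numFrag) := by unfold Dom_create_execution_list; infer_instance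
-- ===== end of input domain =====

-- B replaces A's repeated full rescans of the pair buffer (one greedy scan per
-- round, with [-1,-1] tombstones left in place) by a single pass over the pairs
-- that drops each pair into the earliest round where both endpoints are free.

-- ===== PORT A =====
-- itertools.combinations(lst, 2) in generation order
def pvComb2 : List Int → List (Int × Int)
  | [] => []
  | x :: xs => xs.map (fun y => (x, y)) ++ pvComb2 xs

-- the inner 'for j in range(len(buff))' scan: marks taken pairs as (-1,-1),
-- accumulates step_list_i / step_list_j
def pvScanA : List (Int × Int) → List Int → List Int → List (Int × Int) × List Int × List Int
  | [], si, sj => ([], si, sj)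
  | t :: rest, si, sj =>
    if 0 ≤ t.1 ∧ (t.1 ∉ si ∧ t.2 ∉ si) ∧ (t.1 ∉ sj ∧ t.2 ∉ sj) then
      let r := pvScanA rest (si ++ [t.1]) (sj ++ [t.2])
      (((-1, -1) : Int × Int) :: r.1, r.2)
    else
      let r := pvScanA rest si sj
      (t :: r.1, r.2)

theorem pvScanA_len (L : List (Int × Int)) : ∀ si sj, (pvScanA L si sj).1.length = L.length := by
  induction L with
  | nil => intro si sj; rfl
  | cons t rest ih =>
    intro si sj
    simp only [pvScanA]
    split <;> simp [ih]

-- the outer 'while len(buff) > 0' loop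
def pvLoopA : List (Int × Int) → List Int × List Int
  | [] => ([], [])
  | t :: rest =>
    if 0 ≤ t.1 then
      let r := pvScanA rest [t.1] [t.2]
      let p := pvLoopA r.1
      (r.2.1 ++ p.1, r.2.2 ++ p.2)
    else pvLoopA rest
termination_by L => L.length
decreasing_by
  · simp [pvScanA_len]
  · simp

def create_execution_list (numFrag : Int) : List Int × List Int :=
  pvLoopA (pvComb2 (PySem.List.pyRange 0 numFrag 1))

-- ===== PORT B =====
-- put (i, j) into the first bucket (round) where neither endpoint occurs; else a new bucket
def pvInsertFF : List (List Int × List Int) → Int → Int → List (List Int × List Int)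
  | [], i, j => [([i], [j])]
  | b :: bs, i, j =>
    if i ∉ b.1 ∧ i ∉ b.2 ∧ j ∉ b.1 ∧ j ∉ b.2 then (b.1 ++ [i], b.2 ++ [j]) :: bs
    else b :: pvInsertFF bs i j

def create_execution_list_alt (numFrag : Int) : List Int × List Int :=
  let buckets := (pvComb2 (PySem.List.pyRange 0 numFrag 1)).foldl
      (fun bs p => pvInsertFF bs p.1 p.2) []
  buckets.foldl (fun acc b => (acc.1 ++ b.1, acc.2 ++ b.2)) ([], [])

-- ===== PRECONDITION & SPEC =====
def Spec_create_execution_list (numFrag : Int) (out : List Int × List Int) : Prop := out = create_execution_list_alt numFrag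
instance (numFrag : Int) (out : List Int × List Int) : Decidable (Spec_create_execution_list numFrag out) := by unfold Spec_create_execution_list; infer_instance

-- ===== CLAIM (what is proved, stated in full; the proofs are below) =====
def Claim_equal_create_execution_list : Prop := ∀ (numFrag : Int), Dom_create_execution_list numFrag → Spec_create_execution_list numFrag (create_execution_list numFrag)

-- ===== LEMMAS AND PROOFS =====

theorem pvScanA_cons_pos (t : Int × Int) (rest : List (Int × Int)) (si sj : List Int)
    (h : 0 ≤ t.1 ∧ (t.1 ∉ si ∧ t.2 ∉ si) ∧ (t.1 ∉ sj ∧ t.2 ∉ sj)) :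
    pvScanA (t :: rest) si sj
      = (((-1,-1) : Int × Int) :: (pvScanA rest (si ++ [t.1]) (sj ++ [t.2])).1,
         (pvScanA rest (si ++ [t.1]) (sj ++ [t.2])).2) := by
  simp only [pvScanA, if_pos h]

theorem pvScanA_cons_neg (t : Int × Int) (rest : List (Int × Int)) (si sj : List Int)
    (h : ¬ (0 ≤ t.1 ∧ (t.1 ∉ si ∧ t.2 ∉ si) ∧ (t.1 ∉ sj ∧ t.2 ∉ sj))) :
    pvScanA (t :: rest) si sj
      = (t :: (pvScanA rest si sj).1, (pvScanA rest si sj).2) := by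
  simp only [pvScanA, if_neg h]

-- keep only the live (non-tombstone) pairs
def pvF (L : List (Int × Int)) : List (Int × Int) := L.filter (fun p => decide (0 ≤ p.1))

def pvFoldFF (bs : List (List Int × List Int)) (L : List (Int × Int)) : List (List Int × List Int) :=
  L.foldl (fun bs p => pvInsertFF bs p.1 p.2) bs

def pvConcatB (bs : List (List Int × List Int)) : List Int × List Int :=
  bs.foldl (fun acc b => (acc.1 ++ b.1, acc.2 ++ b.2)) ([], [])

theorem pvConcatB_acc (bs : List (List Int × List Int)) :
    ∀ acc : List Int × List Int,
      bs.foldl (fun acc b => (acc.1 ++ b.1, acc.2 ++ b.2)) acc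
        = (acc.1 ++ (pvConcatB bs).1, acc.2 ++ (pvConcatB bs).2) := by
  induction bs with
  | nil => intro acc; simp [pvConcatB]
  | cons b bs ih =>
    intro acc
    have hb : pvConcatB (b :: bs) = (b.1 ++ (pvConcatB bs).1, b.2 ++ (pvConcatB bs).2) := by
      unfold pvConcatB
      simp only [List.foldl_cons, ih]
      simp
    rw [hb]
    simp only [List.foldl_cons, ih]
    simp

theorem pvConcatB_cons (b : List Int × List Int) (bs : List (List Int × List Int)) :
    pvConcatB (b :: bs) = (b.1 ++ (pvConcatB bs).1, b.2 ++ (pvConcatB bs).2) := by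
  unfold pvConcatB
  simp only [List.foldl_cons, pvConcatB_acc]
  simp

-- scanning commutes with dropping tombstones
theorem pvScanA_filter (L : List (Int × Int)) : ∀ si sj,
    (pvScanA (pvF L) si sj).2 = (pvScanA L si sj).2 ∧
    pvF (pvScanA (pvF L) si sj).1 = pvF (pvScanA L si sj).1 := by
  induction L with
  | nil => intro si sj; simp [pvF, pvScanA]
  | cons t rest ih =>
    intro si sj
    by_cases hr : 0 ≤ t.1
    · have hF : pvF (t :: rest) = t :: pvF rest := by simp [pvF, hr]
      rw [hF]
      by_cases hc : (t.1 ∉ si ∧ t.2 ∉ si) ∧ (t.1 ∉ sj ∧ t.2 ∉ sj)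
      · have hpos : 0 ≤ t.1 ∧ (t.1 ∉ si ∧ t.2 ∉ si) ∧ (t.1 ∉ sj ∧ t.2 ∉ sj) := ⟨hr, hc⟩
        rw [pvScanA_cons_pos t (pvF rest) si sj hpos, pvScanA_cons_pos t rest si sj hpos]
        have h := ih (si ++ [t.1]) (sj ++ [t.2])
        refine ⟨h.1, ?_⟩
        simpa [pvF] using h.2
      · have hneg : ¬ (0 ≤ t.1 ∧ (t.1 ∉ si ∧ t.2 ∉ si) ∧ (t.1 ∉ sj ∧ t.2 ∉ sj)) := by tauto
        rw [pvScanA_cons_neg t (pvF rest) si sj hneg, pvScanA_cons_neg t rest si sj hneg]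
        have h := ih si sj
        refine ⟨h.1, ?_⟩
        simpa [pvF, hr] using h.2
    · have hF : pvF (t :: rest) = pvF rest := by simp [pvF, hr]
      rw [hF]
      have hneg : ¬ (0 ≤ t.1 ∧ (t.1 ∉ si ∧ t.2 ∉ si) ∧ (t.1 ∉ sj ∧ t.2 ∉ sj)) := by tauto
      rw [pvScanA_cons_neg t rest si sj hneg]
      have h := ih si sj
      refine ⟨h.1, ?_⟩
      simpa [pvF, hr] using h.2

-- peel one round off the first-fit fold: on a tombstone-free list, the first
-- bucket ends up exactly as A's greedy round scan fills it
theorem pvPeel (L : List (Int × Int)) : ∀ (_hc : ∀ p ∈ L, (0:Int) ≤ p.1) (si sj : List Int)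
    (bs : List (List Int × List Int)),
    pvFoldFF (((si, sj) : List Int × List Int) :: bs) L
      = ((pvScanA L si sj).2.1, (pvScanA L si sj).2.2) :: pvFoldFF bs (pvF (pvScanA L si sj).1) := by
  induction L with
  | nil => intro _ si sj bs; simp [pvFoldFF, pvScanA, pvF]
  | cons t rest ih =>
    intro hc si sj bs
    have hr : (0:Int) ≤ t.1 := hc t (by simp)
    have hrest : ∀ p ∈ rest, (0:Int) ≤ p.1 := fun p hp => hc p (by simp [hp])
    by_cases hm : (t.1 ∉ si ∧ t.2 ∉ si) ∧ (t.1 ∉ sj ∧ t.2 ∉ sj)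
    · have hpos : 0 ≤ t.1 ∧ (t.1 ∉ si ∧ t.2 ∉ si) ∧ (t.1 ∉ sj ∧ t.2 ∉ sj) := ⟨hr, hm⟩
      have hins : pvInsertFF ((si, sj) :: bs) t.1 t.2 = (si ++ [t.1], sj ++ [t.2]) :: bs := by
        simp only [pvInsertFF]
        rw [if_pos (by tauto)]
      simp only [pvFoldFF, List.foldl_cons]
      rw [hins]
      have hih := ih hrest (si ++ [t.1]) (sj ++ [t.2]) bs
      simp only [pvFoldFF] at hih
      rw [hih, pvScanA_cons_pos t rest si sj hpos]
      simp [pvF]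
    · have hneg : ¬ (0 ≤ t.1 ∧ (t.1 ∉ si ∧ t.2 ∉ si) ∧ (t.1 ∉ sj ∧ t.2 ∉ sj)) := by tauto
      have hins : pvInsertFF ((si, sj) :: bs) t.1 t.2 = (si, sj) :: pvInsertFF bs t.1 t.2 := by
        simp only [pvInsertFF]
        rw [if_neg (by tauto)]
      simp only [pvFoldFF, List.foldl_cons]
      rw [hins]
      have hih := ih hrest si sj (pvInsertFF bs t.1 t.2)
      simp only [pvFoldFF] at hih
      rw [hih, pvScanA_cons_neg t rest si sj hneg]
      have hFt : pvF (t :: (pvScanA rest si sj).1) = t :: pvF (pvScanA rest si sj).1 := by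
        simp [pvF, hr]
      simp only [hFt, List.foldl_cons]

-- main invariant: A's loop equals B's first-fit fold on the live pairs
theorem pvMain : ∀ (k : Nat) (L : List (Int × Int)), L.length ≤ k →
    pvLoopA L = pvConcatB (pvFoldFF [] (pvF L)) := by
  intro k
  induction k with
  | zero =>
    intro L hL
    have : L = [] := List.eq_nil_of_length_eq_zero (Nat.le_zero.mp hL)
    subst this
    simp [pvLoopA, pvF, pvFoldFF, pvConcatB]
  | succ k ih =>
    intro L hL
    match L with
    | [] => simp [pvLoopA, pvF, pvFoldFF, pvConcatB]
    | t :: rest =>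
      by_cases hr : 0 ≤ t.1
      · have hF : pvF (t :: rest) = t :: pvF rest := by simp [pvF, hr]
        have hcF : ∀ p ∈ pvF rest, (0:Int) ≤ p.1 := by
          intro p hp
          have := List.of_mem_filter hp
          simpa using this
        simp only [pvLoopA, if_pos hr, hF]
        have hins0 : pvFoldFF [] (t :: pvF rest)
            = pvFoldFF [(([t.1], [t.2]) : List Int × List Int)] (pvF rest) := by
          simp [pvFoldFF, List.foldl_cons, pvInsertFF]
        rw [hins0, pvPeel (pvF rest) hcF [t.1] [t.2] []]
        have hsf := pvScanA_filter rest [t.1] [t.2]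
        rw [hsf.1, hsf.2, pvConcatB_cons]
        have hlen : (pvScanA rest [t.1] [t.2]).1.length ≤ k := by
          rw [pvScanA_len]
          exact Nat.lt_succ_iff.mp (Nat.lt_of_lt_of_le (by simp) hL)
        rw [ih (pvScanA rest [t.1] [t.2]).1 hlen]
      · have hF : pvF (t :: rest) = pvF rest := by simp [pvF, hr]
        simp only [pvLoopA, if_neg hr, hF]
        exact ih rest (Nat.lt_succ_iff.mp (Nat.lt_of_lt_of_le (by simp) hL))

theorem pvComb2_fst : ∀ (xs : List Int) (p : Int × Int), p ∈ pvComb2 xs → p.1 ∈ xs := by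
  intro xs
  induction xs with
  | nil => intro p hp; simp [pvComb2] at hp
  | cons x xs ih =>
    intro p hp
    simp only [pvComb2, List.mem_append, List.mem_map] at hp
    rcases hp with ⟨y, _, rfl⟩ | hp
    · simp
    · simp [ih p hp]

-- every generated pair is live, so the filter is the identity on the initial buffer
theorem pvComb2_clean (n : Int) : pvF (pvComb2 (PySem.List.pyRange 0 n 1)) = pvComb2 (PySem.List.pyRange 0 n 1) := by
  apply List.filter_eq_self.mpr
  intro p hp
  have h1 := pvComb2_fst _ p hp
  have h2 := (PySem.List.mem_pyRange_one.mp h1).1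
  simpa using h2

-- ===== VERDICT (by name: the statement is the Claim_ definition above) =====
theorem create_execution_list_spec : Claim_equal_create_execution_list := by
  intro n _
  unfold Spec_create_execution_list create_execution_list create_execution_list_alt
  rw [pvMain (pvComb2 (PySem.List.pyRange 0 n 1)).length _ le_rfl, pvComb2_clean]
  rfl
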